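-- pv_equiv track=rewrite | github.com/kongusen/loom-agent | loom/tools/search/executor.py | _text_match
-- ===== SOURCE A (Python) =====
-- def _text_match(query: str, content: str) -> bool:
--     """简单文本匹配（L1-L3 降级搜索）"""
--     if not query:
--         return True
--     query_lower = query.lower()
--     content_lower = content.lower()
--     # 任意一个查询词出现即匹配
--     words = [w for w in query_lower.split() if len(w) >= 2]
--     if not words:
--         return True
--     return any(w in content_lower for w in words)
-- ===== SOURCE B (Python) =====
-- def _text_match(query: str, content: str) -> bool:
--     """Position-major single scan: walk content once and test each word as a
--     prefix at the current position, instead of one substring search per word."""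
--     if not query:
--         return True
--     words = [w for w in query.lower().split() if len(w) >= 2]
--     if not words:
--         return True
--     cl = content.lower()
--     for i in range(len(cl)):
--         for w in words:
--             if cl.startswith(w, i):
--                 return True
--     return False
-- ===== Notes on version B (the rewrite author's own statement) =====
-- stated objective: alternative
-- what changed: Replaces the word-major any(w in content) substring loop by a position-major single left-to-right scan of the content that tests each word as a prefix at the current position.
import Mathlib
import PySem

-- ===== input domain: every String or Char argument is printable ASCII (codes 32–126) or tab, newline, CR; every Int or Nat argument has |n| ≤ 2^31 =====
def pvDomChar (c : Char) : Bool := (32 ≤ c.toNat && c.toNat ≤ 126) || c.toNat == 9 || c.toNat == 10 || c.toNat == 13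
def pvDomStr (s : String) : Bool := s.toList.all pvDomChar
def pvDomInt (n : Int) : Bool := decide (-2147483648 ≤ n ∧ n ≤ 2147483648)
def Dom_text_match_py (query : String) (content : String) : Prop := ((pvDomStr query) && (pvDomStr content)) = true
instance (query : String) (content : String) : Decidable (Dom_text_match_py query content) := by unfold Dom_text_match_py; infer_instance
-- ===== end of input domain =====

-- B: position-major single scan of the content testing each word as a prefix,
-- instead of A's word-major per-word substring searches (objective: alternative).


-- ===== PORT A =====
def text_match_py (query : String) (content : String) : Bool :=
  if query == "" then true
  else
    let query_lower := PySem.Str.lower query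
    let content_lower := PySem.Str.lower content
    let words := (PySem.Str.split₀ query_lower).filter (fun w => decide (2 ≤ PySem.Str.len w))
    if words == [] then true
    else words.any (fun w => PySem.Str.isIn w content_lower)

-- ===== PORT B =====
-- the 'for i in range(len(cl))' loop of Source B, as structural recursion on the suffix of cl
def tmScan (words : List (List Char)) : List Char → Bool
  | [] => false
  | c :: rest =>
    if words.any (fun w => PySem.Chars.startswith (c :: rest) w) then true
    else tmScan words rest

def text_match_py_alt (query : String) (content : String) : Bool :=
  if query == "" then true
  else
    let words := (PySem.Str.split₀ (PySem.Str.lower query)).filter (fun w => decide (2 ≤ PySem.Str.len w))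
    if words == [] then true
    else tmScan (words.map String.toList) (PySem.Str.lower content).toList

-- ===== PRECONDITION & SPEC =====
def Spec_text_match_py (query : String) (content : String) (out : Bool) : Prop := out = text_match_py_alt query content
instance (query : String) (content : String) (out : Bool) : Decidable (Spec_text_match_py query content out) := by unfold Spec_text_match_py; infer_instance

-- ===== CLAIM (what is proved, stated in full; the proofs are below) =====
def Claim_equal_text_match_py : Prop := ∀ (query : String) (content : String), Dom_text_match_py query content → Spec_text_match_py query content (text_match_py query content)

-- ===== LEMMAS AND PROOFS =====

-- the scan finds a word iff some word is an infix (words are nonempty)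
theorem tmScan_iff (ws : List (List Char)) (s : List Char)
    (h : ∀ w ∈ ws, w ≠ []) :
    tmScan ws s = true ↔ ∃ w ∈ ws, w <:+: s := by
  induction s with
  | nil =>
    constructor
    · intro hfalse; simp [tmScan] at hfalse
    · rintro ⟨w, hw, hinf⟩
      exact absurd (List.eq_nil_of_infix_nil hinf) (h w hw)
  | cons c rest ih =>
    simp only [tmScan]
    split_ifs with hany
    · simp only [true_iff]
      rcases List.any_eq_true.mp hany with ⟨w, hw, hsw⟩
      exact ⟨w, hw, ((PySem.Chars.startswith_iff _ _).mp hsw).isInfix⟩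
    · rw [ih]
      constructor
      · rintro ⟨w, hw, hinf⟩; exact ⟨w, hw, hinf.trans (List.suffix_cons c rest).isInfix⟩
      · rintro ⟨w, hw, hinf⟩
        rcases List.infix_cons_iff.mp hinf with hpre | hinf'
        · exact absurd (List.any_eq_true.mpr
            ⟨w, hw, (PySem.Chars.startswith_iff _ _).mpr hpre⟩) hany
        · exact ⟨w, hw, hinf'⟩

-- ===== VERDICT (by name: the statement is the Claim_ definition above) =====
theorem text_match_py_spec : Claim_equal_text_match_py := by
  intro query content _
  unfold Spec_text_match_py text_match_py text_match_py_alt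
  simp only []
  split_ifs with h1 h2
  · rfl
  · rfl
  set words := (PySem.Str.split₀ (PySem.Str.lower query)).filter
      (fun w => decide (2 ≤ PySem.Str.len w)) with hwords
  have hne : ∀ w ∈ words.map String.toList, w ≠ [] := by
    intro w hwmem
    rcases List.mem_map.mp hwmem with ⟨v, hv, rfl⟩
    have h2 : 2 ≤ PySem.Str.len v := by
      have := List.mem_filter.mp (hwords ▸ hv)
      exact of_decide_eq_true this.2
    intro hnil
    have : PySem.Str.len v = v.toList.length := by simp [PySem.Str.len_eq]
    rw [this, hnil] at h2
    simp at h2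
  rw [Bool.eq_iff_iff, tmScan_iff _ _ hne, List.any_eq_true]
  constructor
  · rintro ⟨w, hwm, hin⟩
    exact ⟨w.toList, List.mem_map_of_mem hwm,
      (PySem.Str.isIn_iff_infix _ _).mp hin⟩
  · rintro ⟨w, hwm, hinf⟩
    rcases List.mem_map.mp hwm with ⟨v, hv, rfl⟩
    exact ⟨v, hv, (PySem.Str.isIn_iff_infix _ _).mpr hinf⟩
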